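-- pv_equiv track=rewrite | github.com/jennirupponenkeuda/Python | osa04-19_listan_pisimmat/src/listan_pisimmat.py | pisimmat
-- ===== SOURCE A (Python) =====
-- def pisimmat(lista):
--     pisimmat_merkkijonot = []
--     pituus = 0
--
--     for merkkijono in lista:
--         if len(merkkijono) > pituus:
--             pisimmat_merkkijonot = [merkkijono]
--             pituus = len(merkkijono)
--         elif len(merkkijono) == pituus:
--             pisimmat_merkkijonot.append(merkkijono)
--
--     return pisimmat_merkkijonot
-- ===== SOURCE B (Python) =====
-- def pisimmat(lista):
--     pituus = max((len(m) for m in lista), default=0)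
--     return [m for m in lista if len(m) == pituus]
-- ===== Notes on version B (the rewrite author's own statement) =====
-- stated objective: simpler
-- what changed: Replaces A's single-pass running-maximum accumulator (rebuilding/appending to a result list while scanning) with a two-pass approach: compute the maximum length with max(..., default=0), then filter by that length with a comprehension.
import Mathlib
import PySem

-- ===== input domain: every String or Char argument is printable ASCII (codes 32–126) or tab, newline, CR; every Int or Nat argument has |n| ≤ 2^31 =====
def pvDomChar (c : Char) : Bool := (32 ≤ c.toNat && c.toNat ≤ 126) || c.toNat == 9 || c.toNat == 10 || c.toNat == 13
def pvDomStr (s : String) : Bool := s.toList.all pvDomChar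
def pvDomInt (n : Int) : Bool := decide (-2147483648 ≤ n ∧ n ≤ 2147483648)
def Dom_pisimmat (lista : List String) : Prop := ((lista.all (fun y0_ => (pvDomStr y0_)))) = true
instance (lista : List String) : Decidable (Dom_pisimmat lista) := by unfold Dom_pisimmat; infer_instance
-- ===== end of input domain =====

-- B replaces A's single-pass running-maximum accumulator with a two-pass max-then-filter (simpler).


-- ===== PORT A =====
-- loop over lista carrying the accumulator and the running maximum length, branch order as in A
def pisimmatLoop (acc : List String) (pituus : Nat) : List String → List String
  | [] => acc
  | merkkijono :: rest =>
      if merkkijono.length > pituus then pisimmatLoop [merkkijono] merkkijono.length rest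
      else if merkkijono.length = pituus then pisimmatLoop (acc ++ [merkkijono]) pituus rest
      else pisimmatLoop acc pituus rest

def pisimmat (lista : List String) : List String := pisimmatLoop [] 0 lista

-- ===== PORT B =====
def pisimmat_alt (lista : List String) : List String :=
  let pituus := lista.foldl (fun a m => max a m.length) 0   -- max(..., default=0)
  lista.filter (fun m => m.length == pituus)

-- ===== PRECONDITION & SPEC =====
def Spec_pisimmat (lista : List String) (out : List String) : Prop := out = pisimmat_alt lista
instance (lista : List String) (out : List String) : Decidable (Spec_pisimmat lista out) := by unfold Spec_pisimmat; infer_instance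

-- ===== CLAIM (what is proved, stated in full; the proofs are below) =====
def Claim_equal_pisimmat : Prop := ∀ (lista : List String), Dom_pisimmat lista → Spec_pisimmat lista (pisimmat lista)

-- ===== LEMMAS AND PROOFS =====
def maxLenFrom (xs : List String) (p : Nat) : Nat := xs.foldl (fun a m => max a m.length) p

lemma le_maxLenFrom (xs : List String) (p : Nat) : p ≤ maxLenFrom xs p := by
  induction xs generalizing p with
  | nil => simp [maxLenFrom]
  | cons x t ih =>
      have := ih (max p x.length)
      simp only [maxLenFrom, List.foldl] at *
      omega

lemma pisimmatLoop_eq (xs : List String) : ∀ (acc : List String) (p : Nat),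
    pisimmatLoop acc p xs =
      (if maxLenFrom xs p > p then [] else acc)
        ++ xs.filter (fun m => m.length == maxLenFrom xs p) := by
  induction xs with
  | nil => intro acc p; simp [pisimmatLoop, maxLenFrom]
  | cons x t ih =>
      intro acc p
      have hcons : maxLenFrom (x :: t) p = maxLenFrom t (max p x.length) := rfl
      by_cases h1 : x.length > p
      · have hm : maxLenFrom (x :: t) p = maxLenFrom t x.length := by
          rw [hcons]; congr 1; omega
        have hle : x.length ≤ maxLenFrom t x.length := le_maxLenFrom t x.length
        rw [show pisimmatLoop acc p (x :: t) = pisimmatLoop [x] x.length t by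
              simp [pisimmatLoop, h1], ih, hm]
        by_cases h2 : maxLenFrom t x.length > x.length
        · have hx : (x.length == maxLenFrom t x.length) = false := by
            simp; omega
          simp [h2, List.filter, hx]; omega
        · have hx : (x.length == maxLenFrom t x.length) = true := by
            simp; omega
          have h3 : maxLenFrom t x.length > p := by omega
          simp [h2, h3, List.filter, hx]
      · have hmaxp : max p x.length = p := by omega
        have hm : maxLenFrom (x :: t) p = maxLenFrom t p := by rw [hcons, hmaxp]
        have hle : p ≤ maxLenFrom t p := le_maxLenFrom t p
        by_cases h2 : x.length = p
        · rw [show pisimmatLoop acc p (x :: t) = pisimmatLoop (acc ++ [x]) p t by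
                simp [pisimmatLoop, h2], ih, hm]
          by_cases h3 : maxLenFrom t p > p
          · have hx : (x.length == maxLenFrom t p) = false := by simp; omega
            simp [h3, List.filter, hx]
          · have hx : (x.length == maxLenFrom t p) = true := by simp; omega
            simp [h3, List.filter, hx]
        · rw [show pisimmatLoop acc p (x :: t) = pisimmatLoop acc p t by
                simp [pisimmatLoop, h1, h2], ih, hm]
          have hx : (x.length == maxLenFrom t p) = false := by simp; omega
          simp [List.filter, hx]

-- ===== VERDICT (by name: the statement is the Claim_ definition above) =====
theorem pisimmat_spec : Claim_equal_pisimmat := by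
  intro lista _
  unfold Spec_pisimmat pisimmat pisimmat_alt
  rw [pisimmatLoop_eq]
  have h := le_maxLenFrom lista 0
  simp [maxLenFrom]
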